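-- pv_equiv track=rewrite | github.com/moordo91/BOJ_odyssey | 프로그래머스/2/42587. 프로세스/프로세스.py | solution
-- ===== SOURCE A (Python) =====
-- from collections import deque
--
-- def solution(priorities, location):
--     answer = 1
--     N = len(priorities)
--     max_priority = max(priorities)
--     proc_q = deque(priorities)
--     loc_q = deque([i for i in range(N)])
--
--     while proc_q:
--         cur_p = proc_q.popleft()
--         cur_l = loc_q.popleft()
--         if cur_p < max_priority:
--             proc_q.append(cur_p)
--             loc_q.append(cur_l)
--         elif cur_p == max_priority:
--             if cur_l == location:
--                 return answer
--             elif max_priority not in proc_q: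
--                 max_priority = max(proc_q)
--             answer += 1
-- ===== SOURCE B (Python) =====
-- def solution(priorities, location):
--     # Group indices by priority; emit groups in descending priority order,
--     # each group ordered circularly starting from the pointer left by the
--     # previous group (index after its last printed process).
--     groups = {}
--     for i, p in enumerate(priorities):
--         groups.setdefault(p, []).append(i)
--     answer = 0
--     s = 0
--     for p in sorted(groups, reverse=True):
--         idxs = groups[p]
--         block = [i for i in idxs if i >= s] + [i for i in idxs if i < s]
--         if p == priorities[location]:
--             return answer + block.index(location) + 1
--         answer += len(block)
--         s = block[-1] + 1
-- ===== Notes on version B (the rewrite author's own statement) =====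
-- stated objective: faster
-- what changed: B replaces A's element-by-element queue rotation with a bucket-by-priority pass: indices are grouped per priority once, groups are emitted in descending priority order, each ordered circularly from the pointer left by the previous group, so the answer is found without simulating the queue.
import Mathlib
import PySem

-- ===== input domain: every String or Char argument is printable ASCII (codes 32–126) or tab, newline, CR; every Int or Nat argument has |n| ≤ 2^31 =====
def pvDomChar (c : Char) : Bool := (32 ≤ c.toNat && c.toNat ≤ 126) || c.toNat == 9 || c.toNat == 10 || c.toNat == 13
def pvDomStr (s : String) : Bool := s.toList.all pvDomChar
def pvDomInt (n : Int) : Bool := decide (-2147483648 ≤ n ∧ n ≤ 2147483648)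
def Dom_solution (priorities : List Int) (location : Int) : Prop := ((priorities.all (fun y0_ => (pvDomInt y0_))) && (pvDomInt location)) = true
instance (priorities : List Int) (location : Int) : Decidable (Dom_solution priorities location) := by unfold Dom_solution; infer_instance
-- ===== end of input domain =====

-- B replaces A's one-step-at-a-time queue rotation by grouping indices per priority and
-- emitting the groups in descending priority order, each ordered circularly from the
-- pointer left by the previous group (asymptotically faster on rotation-heavy inputs).

-- ===== PORT A =====
-- the while loop of A; fuel is only a totality guard (the loop performs at most
-- N rotations per printed process, so N*N + N + 1 steps always suffice)
def solutionLoop (location : Int) : Nat → Int → Int → List Int → List Int → Int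
  | 0, _, _, _, _ => 0
  | fuel+1, answer, maxp, procq, locq =>
    match procq, locq with
    | p :: ps, l :: ls =>
      if p < maxp then solutionLoop location fuel answer maxp (ps ++ [p]) (ls ++ [l])
      else if p = maxp then
        if l = location then answer
        else solutionLoop location fuel (answer + 1)
          (if ps.contains maxp then maxp else (PySem.List.max? ps (fun x => x)).getD 0) ps ls
      else solutionLoop location fuel answer maxp ps ls
    | _, _ => 0

def solution (priorities : List Int) (location : Int) : Int :=
  let N := priorities.length
  let maxp := (PySem.List.max? priorities (fun x => x)).getD 0
  solutionLoop location (N * N + N + 1) 1 maxp priorities (PySem.List.pyRange 0 (N : Int) 1)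

-- ===== PORT B =====
-- the for loop of B over the priorities sorted descending
def altLoop (location pLoc : Int) (groups : PySem.Dict Int (List Int)) : List Int → Int → Int → Int
  | [], _, _ => 0
  | p :: rest, answer, s =>
    let idxs := groups.getD p []
    let block := idxs.filter (fun i => decide (s ≤ i)) ++ idxs.filter (fun i => decide (i < s))
    if p = pLoc then answer + (((PySem.List.index? block location).getD 0 : Nat) : Int) + 1
    else altLoop location pLoc groups rest (answer + block.length) (PySem.List.pyGetD block (-1) 0 + 1)

def solution_alt (priorities : List Int) (location : Int) : Int :=
  let groups := (PySem.List.enumerate priorities 0).foldl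
    (fun d q => d.modify q.2 ([] : List Int) (fun l => l ++ [q.1])) PySem.Dict.empty
  let ks := PySem.List.sorted groups.keys (fun x => x) true
  altLoop location (PySem.List.pyGetD priorities location 0) groups ks 0 0

-- ===== PRECONDITION & SPEC =====
-- Pre_ excludes exactly the inputs on which A raises: the empty list (max([]) is a
-- ValueError) and locations outside range(len(priorities)) (the queue then empties and
-- A calls max on an empty deque — ValueError — or falls off the loop returning None).
def Pre_solution (priorities : List Int) (location : Int) : Prop :=
  priorities ≠ [] ∧ 0 ≤ location ∧ location < (priorities.length : Int)
instance (priorities : List Int) (location : Int) : Decidable (Pre_solution priorities location) := by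
  unfold Pre_solution; infer_instance
def pvWitness_solution : List Int × Int := ([2, 1, 3, 1, 2], 2)

def Spec_solution (priorities : List Int) (location : Int) (out : Int) : Prop := out = solution_alt priorities location
instance (priorities : List Int) (location : Int) (out : Int) : Decidable (Spec_solution priorities location out) := by unfold Spec_solution; infer_instance

-- ===== CLAIM (what is proved, stated in full; the proofs are below) =====
def Claim_equal_solution : Prop := ∀ (priorities : List Int) (location : Int), Dom_solution priorities location → Pre_solution priorities location → Spec_solution priorities location (solution priorities location)

-- ===== LEMMAS AND PROOFS =====

-- suffix of c strictly after the last element whose f-value is m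
def afterLastM (f : Int → Int) (m : Int) : List Int → List Int
  | [] => []
  | i :: c => if f i = m ∧ m ∉ c.map f then c else afterLastM f m c

-- elements of c before the last element with f-value m, those with f-value m removed
def nonMBefore (f : Int → Int) (m : Int) : List Int → List Int
  | [] => []
  | i :: c => if m ∈ c.map f then (if f i = m then nonMBefore f m c else i :: nonMBefore f m c) else []

-- the queue at the start of a group: unprinted indices in circular order from pointer s
def circQ (f : Int → Int) (ks : List Int) (s n : Int) : List Int :=
  (PySem.List.pyRange s n 1).filter (fun i => decide (f i ∈ ks))
    ++ (PySem.List.pyRange 0 s 1).filter (fun i => decide (f i ∈ ks))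

lemma afterLastM_spec (f : Int → Int) (m : Int) (l₁ : List Int) (t : Int) (l₂ : List Int)
    (ht : f t = m) (h₂ : ∀ i ∈ l₂, f i ≠ m) :
    afterLastM f m (l₁ ++ t :: l₂) = l₂ := by
  induction l₁ with
  | nil =>
    simp only [List.nil_append, afterLastM]
    rw [if_pos]
    refine ⟨ht, ?_⟩
    simp only [List.mem_map, not_exists, not_and]
    intro i hi he
    exact h₂ i hi he
  | cons x l₁ ih =>
    simp only [List.cons_append, afterLastM]
    rw [if_neg, ih]
    rintro ⟨-, hnm⟩
    exact hnm (by simp only [List.mem_map]; exact ⟨t, by simp, ht⟩)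

lemma nonMBefore_spec (f : Int → Int) (m : Int) (l₁ : List Int) (t : Int) (l₂ : List Int)
    (ht : f t = m) (h₂ : ∀ i ∈ l₂, f i ≠ m) :
    nonMBefore f m (l₁ ++ t :: l₂) = l₁.filter (fun i => decide (f i ≠ m)) := by
  induction l₁ with
  | nil =>
    simp only [List.nil_append, nonMBefore, List.filter_nil]
    rw [if_neg]
    simp only [List.mem_map, not_exists, not_and]
    intro i hi he
    exact h₂ i hi he
  | cons x l₁ ih =>
    have hmem : m ∈ (l₁ ++ t :: l₂).map f := by
      simp only [List.mem_map]; exact ⟨t, by simp, ht⟩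
    simp only [List.cons_append, nonMBefore, if_pos hmem, List.filter_cons]
    by_cases hx : f x = m
    · simp [hx, ih]
    · simp [hx, ih]

lemma index?_of_mem (l : List Int) (v : Int) (h : v ∈ l) :
    PySem.List.index? l v = some (l.idxOf v) := by
  induction l with
  | nil => simp at h
  | cons x l ih =>
    by_cases hx : x = v
    · subst hx
      rw [PySem.List.index?_cons_self, List.idxOf_cons]
      simp
    · have hv : v ∈ l := by
        rcases List.mem_cons.mp h with h' | h'
        · exact absurd h'.symm hx
        · exact h'
      rw [PySem.List.index?_cons_of_ne l hx, ih hv, List.idxOf_cons]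
      have : (x == v) = false := by simp [hx]
      simp [this]

lemma maxD_of (l : List Int) (v : Int) (hmem : v ∈ l) (hmax : ∀ y ∈ l, y ≤ v) :
    (PySem.List.max? l (fun x => x)).getD 0 = v := by
  cases hmx : PySem.List.max? l (fun x => x) with
  | none => rw [PySem.List.max?_eq_none_iff] at hmx; subst hmx; simp at hmem
  | some a =>
    have h1 : v ≤ a := PySem.List.max?_isMax hmx v hmem
    have h2 : a ≤ v := hmax a (PySem.List.max?_mem hmx)
    simp [le_antisymm h2 h1]

lemma le_getLast_of_pairwise_lt (l : List Int) (h : l.Pairwise (· < ·)) (x : Int) (hx : x ∈ l)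
    (hne : l ≠ []) : x ≤ l.getLast hne := by
  induction l with
  | nil => exact absurd rfl hne
  | cons a l ih =>
    by_cases hl : l = []
    · subst hl; simp at hx; simp [hx]
    · rw [List.getLast_cons hl]
      rcases List.mem_cons.mp hx with h' | h'
      · subst h'
        have := (List.pairwise_cons.mp h).1 (l.getLast hl) (List.getLast_mem hl)
        exact le_of_lt this
      · exact ih (List.pairwise_cons.mp h).2 h' hl

-- phase lemma: processing one full priority group m in A's loop
lemma phase (f : Int → Int) (m loc : Int) :
  ∀ (c w : List Int) (fuel : Nat) (ans : Int),
    (∀ i ∈ w, f i ≠ m) →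
    (∀ i ∈ c ++ w, f i ≤ m) →
    m ∈ c.map f →
    (c ++ w).length * (c ++ w).length + c.length ≤ fuel →
    (if loc ∈ c.filter (fun i => decide (f i = m)) then
       solutionLoop loc fuel ans m ((c ++ w).map f) (c ++ w) =
         ans + ((c.filter (fun i => decide (f i = m))).idxOf loc : Int)
     else ∃ fuel' : Nat,
       (afterLastM f m c ++ w ++ nonMBefore f m c).length * (afterLastM f m c ++ w ++ nonMBefore f m c).length
           + (afterLastM f m c ++ w ++ nonMBefore f m c).length ≤ fuel' ∧
       solutionLoop loc fuel ans m ((c ++ w).map f) (c ++ w) =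
         solutionLoop loc fuel' (ans + ((c.filter (fun i => decide (f i = m))).length : Int))
           ((PySem.List.max? ((afterLastM f m c ++ w ++ nonMBefore f m c).map f) (fun x => x)).getD 0)
           ((afterLastM f m c ++ w ++ nonMBefore f m c).map f) (afterLastM f m c ++ w ++ nonMBefore f m c)) := by
  intro c
  induction c with
  | nil => intro w fuel ans _ _ hm _; simp at hm
  | cons x c ih =>
    intro w fuel ans hw hle hm hfuel
    have hLlen : ((x :: c) ++ w).length = (c ++ w).length + 1 := by simp
    rw [hLlen] at hfuel
    simp only [List.length_cons] at hfuel
    cases fuel with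
    | zero =>
      exfalso
      have hpos : 0 < ((c ++ w).length + 1) * ((c ++ w).length + 1) := by positivity
      omega
    | succ fuel =>
      have hsq : ((c ++ w).length + 1) * ((c ++ w).length + 1)
          = (c ++ w).length * (c ++ w).length + 2 * (c ++ w).length + 1 := by ring
      by_cases hx : f x = m
      · -- pop of a maximal element
        have hnotlt : ¬ (f x < m) := by omega
        by_cases hxl : x = loc
        · -- A returns here; loc is the head of the group
          subst hxl
          have hcond : x ∈ (x :: c).filter (fun i => decide (f i = m)) := by
            simp [hx]
          rw [if_pos hcond]
          have : (x :: c).filter (fun i => decide (f i = m))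
              = x :: c.filter (fun i => decide (f i = m)) := by simp [hx]
          rw [this, List.idxOf_cons_self]
          simp only [List.cons_append, List.map_cons, solutionLoop]
          rw [if_neg hnotlt, if_pos hx]
          simp
        · -- popped element is not location
          have hfilter : (x :: c).filter (fun i => decide (f i = m))
              = x :: c.filter (fun i => decide (f i = m)) := by simp [hx]
          have hstep : solutionLoop loc (fuel + 1) ans m (((x :: c) ++ w).map f) ((x :: c) ++ w)
              = solutionLoop loc fuel (ans + 1)
                  (if ((c ++ w).map f).contains m then m
                   else (PySem.List.max? ((c ++ w).map f) (fun y => y)).getD 0)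
                  ((c ++ w).map f) (c ++ w) := by
            simp only [List.cons_append, List.map_cons, solutionLoop]
            rw [if_neg hnotlt, if_pos hx, if_neg hxl]
          by_cases hmc : m ∈ c.map f
          · -- more elements of this group remain
            have hcont : ((c ++ w).map f).contains m = true := by
              simp only [List.contains_iff_mem, List.map_append, List.mem_append]
              exact Or.inl hmc
            rw [hcont] at hstep
            simp only [if_true] at hstep
            have hle' : ∀ i ∈ c ++ w, f i ≤ m := by
              intro i hi; exact hle i (by simp at hi ⊢; tauto)
            have hfuel' : (c ++ w).length * (c ++ w).length + c.length ≤ fuel := by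
              have hc : c.length ≤ (c ++ w).length := by simp
              omega
            have h2 := ih w fuel (ans + 1) hw hle' hmc hfuel'
            have hAL : afterLastM f m (x :: c) = afterLastM f m c := by
              simp only [afterLastM]
              rw [if_neg]; rintro ⟨-, hno⟩; exact hno hmc
            have hNB : nonMBefore f m (x :: c) = nonMBefore f m c := by
              simp only [nonMBefore]
              rw [if_pos hmc, if_pos hx]
            rw [hfilter, hAL, hNB]
            by_cases hloc : loc ∈ c.filter (fun i => decide (f i = m))
            · rw [if_pos hloc] at h2
              rw [if_pos (by simp [hloc])]
              rw [hstep, h2, List.idxOf_cons, show ((x == loc) = false) by simp [hxl]]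
              simp only [Bool.cond_false]
              push_cast; ring
            · rw [if_neg hloc] at h2
              rw [if_neg (by rw [List.mem_cons]; rintro (rfl | h); exacts [hxl rfl, hloc h])]
              obtain ⟨fuel', hb, he⟩ := h2
              refine ⟨fuel', hb, ?_⟩
              rw [hstep, he]
              simp only [List.length_cons]
              congr 1
              push_cast; ring
          · -- last element of the group: A recomputes the maximum
            have hcont : ((c ++ w).map f).contains m = false := by
              have hnm : m ∉ (c ++ w).map f := by
                simp only [List.map_append, List.mem_append]
                rintro (h | h)
                · exact hmc h
                · obtain ⟨i, hi, he⟩ := List.mem_map.mp h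
                  exact hw i hi he
              rw [Bool.eq_false_iff]
              rw [Ne, List.contains_iff_mem]
              exact hnm
            rw [hcont] at hstep
            simp only [Bool.false_eq_true, if_false] at hstep
            have hfc : c.filter (fun i => decide (f i = m)) = [] := by
              rw [List.filter_eq_nil_iff]
              intro i hi
              simp only [decide_eq_true_eq]
              intro he
              exact hmc (List.mem_map.mpr ⟨i, hi, he⟩)
            have hAL : afterLastM f m (x :: c) = c := by
              simp only [afterLastM]
              rw [if_pos ⟨hx, hmc⟩]
            have hNB : nonMBefore f m (x :: c) = [] := by
              simp only [nonMBefore]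
              rw [if_neg hmc]
            rw [hfilter, hfc, hAL, hNB]
            rw [if_neg (by simp only [List.mem_singleton]; exact fun h => hxl h.symm)]
            have hq : c ++ w ++ ([] : List Int) = c ++ w := by simp
            rw [hq]
            refine ⟨fuel, by omega, ?_⟩
            rw [hstep]
            norm_num
      · -- rotation: the head has lower priority and is requeued at the back
        have hlt : f x < m := by
          have := hle x (by simp)
          omega
        have hstep : solutionLoop loc (fuel + 1) ans m (((x :: c) ++ w).map f) ((x :: c) ++ w)
            = solutionLoop loc fuel ans m (((c ++ w).map f) ++ [f x]) ((c ++ w) ++ [x]) := by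
          simp only [List.cons_append, List.map_cons, solutionLoop]
          rw [if_pos hlt]
        have hmc : m ∈ c.map f := by
          rcases List.mem_map.mp hm with ⟨i, hi, he⟩
          rcases List.mem_cons.mp hi with rfl | hi'
          · exact absurd he hx
          · exact List.mem_map.mpr ⟨i, hi', he⟩
        have hw' : ∀ i ∈ w ++ [x], f i ≠ m := by
          intro i hi
          rcases List.mem_append.mp hi with h | h
          · exact hw i h
          · rw [List.mem_singleton.mp h]; exact hx
        have hle' : ∀ i ∈ c ++ (w ++ [x]), f i ≤ m := by
          intro i hi
          apply hle
          simp only [List.cons_append, List.mem_cons, List.mem_append] at hi ⊢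
          rcases hi with h | h | h
          · exact Or.inr (Or.inl h)
          · exact Or.inr (Or.inr h)
          · simp at h; subst h; exact Or.inl rfl
        have hlen2 : (c ++ (w ++ [x])).length = (c ++ w).length + 1 := by simp; omega
        have hfuel' : (c ++ (w ++ [x])).length * (c ++ (w ++ [x])).length + c.length ≤ fuel := by
          calc (c ++ (w ++ [x])).length * (c ++ (w ++ [x])).length + c.length
              = ((c ++ w).length + 1) * ((c ++ w).length + 1) + c.length := by rw [hlen2]
            _ ≤ fuel := by omega
        have h2 := ih (w ++ [x]) fuel ans hw' hle' hmc hfuel'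
        have hfilter : (x :: c).filter (fun i => decide (f i = m)) = c.filter (fun i => decide (f i = m)) := by
          simp [hx]
        have hAL : afterLastM f m (x :: c) = afterLastM f m c := by
          simp only [afterLastM]
          rw [if_neg]
          rintro ⟨h1, -⟩
          exact hx h1
        have hNB : nonMBefore f m (x :: c) = x :: nonMBefore f m c := by
          simp only [nonMBefore]
          rw [if_pos hmc, if_neg hx]
        rw [hfilter, hAL, hNB, hstep]
        have e1 : (c ++ w) ++ [x] = c ++ (w ++ [x]) := by simp
        have e2 : List.map f (c ++ w) ++ [f x] = List.map f (c ++ (w ++ [x])) := by simp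
        rw [e1, e2]
        rw [show afterLastM f m c ++ (w ++ [x]) ++ nonMBefore f m c
            = afterLastM f m c ++ w ++ (x :: nonMBefore f m c) from by simp] at h2
        exact h2

lemma filter_filter_of_imp (l : List Int) (p q : Int → Bool)
    (h : ∀ a ∈ l, p a = true → q a = true) : (l.filter q).filter p = l.filter p := by
  rw [List.filter_filter]
  apply List.filter_congr
  intro a ha
  cases hp : p a with
  | true => simp [h a ha hp]
  | false => simp

lemma filter_ge_and (pred : Int → Bool) (a s b : Int) (h1 : a ≤ s) (h2 : s ≤ b) :
    (PySem.List.pyRange a b 1).filter (fun i => decide (s ≤ i) && pred i)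
      = (PySem.List.pyRange s b 1).filter pred := by
  rw [PySem.List.pyRange_one_append a s b h1 h2, List.filter_append]
  have h3 : (PySem.List.pyRange a s 1).filter (fun i => decide (s ≤ i) && pred i) = [] := by
    rw [List.filter_eq_nil_iff]
    intro i hi
    have hm := PySem.List.mem_pyRange_one.mp hi
    simp [show ¬ s ≤ i by omega]
  rw [h3, List.nil_append]
  apply List.filter_congr
  intro i hi
  have hm := PySem.List.mem_pyRange_one.mp hi
  simp [show s ≤ i by omega]

lemma filter_lt_and (pred : Int → Bool) (a s b : Int) (h1 : a ≤ s) (h2 : s ≤ b) :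
    (PySem.List.pyRange a b 1).filter (fun i => decide (i < s) && pred i)
      = (PySem.List.pyRange a s 1).filter pred := by
  rw [PySem.List.pyRange_one_append a s b h1 h2, List.filter_append]
  have h3 : (PySem.List.pyRange s b 1).filter (fun i => decide (i < s) && pred i) = [] := by
    rw [List.filter_eq_nil_iff]
    intro i hi
    have hm := PySem.List.mem_pyRange_one.mp hi
    simp [show ¬ i < s by omega]
  rw [h3, List.append_nil]
  apply List.filter_congr
  intro i hi
  have hm := PySem.List.mem_pyRange_one.mp hi
  simp [show i < s by omega]

lemma kfilter_to_restfilter (f : Int → Int) (p : Int) (rest : List Int) (l : List Int)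
    (h : ∀ i ∈ l, f i ≠ p) :
    l.filter (fun i => decide (f i ∈ p :: rest)) = l.filter (fun i => decide (f i ∈ rest)) := by
  apply List.filter_congr
  intro i hi
  simp [List.mem_cons, h i hi]

lemma kfilter_ne_eq_restfilter (f : Int → Int) (p : Int) (rest : List Int) (l : List Int)
    (hp : p ∉ rest) :
    (l.filter (fun i => decide (f i ∈ p :: rest))).filter (fun i => decide (f i ≠ p))
      = l.filter (fun i => decide (f i ∈ rest)) := by
  rw [List.filter_filter]
  apply List.filter_congr
  intro i _
  by_cases he : f i = p
  · simp [he, hp]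
  · simp [List.mem_cons, he]

lemma mem_circQ (f : Int → Int) (ks : List Int) (s n : Int) (hs0 : 0 ≤ s) (hsn : s ≤ n) (i : Int) :
    i ∈ circQ f ks s n ↔ (0 ≤ i ∧ i < n ∧ f i ∈ ks) := by
  unfold circQ
  simp only [List.mem_append, List.mem_filter, PySem.List.mem_pyRange_one, decide_eq_true_eq]
  constructor
  · rintro (⟨⟨h1, h2⟩, h3⟩ | ⟨⟨h1, h2⟩, h3⟩)
    · exact ⟨by omega, by omega, h3⟩
    · exact ⟨by omega, by omega, h3⟩
  · rintro ⟨h1, h2, h3⟩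
    by_cases hsi : s ≤ i
    · exact Or.inl ⟨⟨hsi, h2⟩, h3⟩
    · exact Or.inr ⟨⟨h1, by omega⟩, h3⟩

lemma altLoop_cons (loc pLoc : Int) (groups : PySem.Dict Int (List Int)) (p : Int)
    (rest : List Int) (ans s : Int) :
    altLoop loc pLoc groups (p :: rest) ans s
      = (if p = pLoc then
          ans + (((PySem.List.index? ((groups.getD p []).filter (fun i => decide (s ≤ i))
            ++ (groups.getD p []).filter (fun i => decide (i < s))) loc).getD 0 : Nat) : Int) + 1
         else altLoop loc pLoc groups rest
           (ans + ((groups.getD p []).filter (fun i => decide (s ≤ i))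
             ++ (groups.getD p []).filter (fun i => decide (i < s))).length)
           (PySem.List.pyGetD ((groups.getD p []).filter (fun i => decide (s ≤ i))
             ++ (groups.getD p []).filter (fun i => decide (i < s))) (-1) 0 + 1)) := rfl

-- the location's priority group is the current one: A returns, B returns
lemma found_case (f : Int → Int) (loc : Int) (groups : PySem.Dict Int (List Int)) (n : Int)
    (hgroups : ∀ q, groups.getD q [] = (PySem.List.pyRange 0 n 1).filter (fun i => decide (f i = q)))
    (rest : List Int) (p s ans : Int) (fuel : Nat)
    (hs0 : 0 ≤ s) (hsn : s ≤ n)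
    (hsort : (p :: rest).Pairwise (· > ·))
    (hlocr : loc ∈ PySem.List.pyRange 0 n 1)
    (hfl : f loc = p)
    (hfuel : (circQ f (p :: rest) s n).length * (circQ f (p :: rest) s n).length
        + (circQ f (p :: rest) s n).length ≤ fuel) :
    solutionLoop loc fuel (ans + 1) p ((circQ f (p :: rest) s n).map f) (circQ f (p :: rest) s n)
      = altLoop loc (f loc) groups (p :: rest) ans s := by
  have hlocb := PySem.List.mem_pyRange_one.mp hlocr
  have hlocQ : loc ∈ circQ f (p :: rest) s n :=
    (mem_circQ f (p :: rest) s n hs0 hsn loc).mpr ⟨hlocb.1, hlocb.2, by rw [hfl]; exact List.mem_cons_self⟩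
  have hg : loc ∈ (circQ f (p :: rest) s n).filter (fun i => decide (f i = p)) :=
    List.mem_filter.mpr ⟨hlocQ, by simp [hfl]⟩
  have hm : p ∈ (circQ f (p :: rest) s n).map f := List.mem_map.mpr ⟨loc, hlocQ, hfl⟩
  have hle : ∀ i ∈ circQ f (p :: rest) s n ++ [], f i ≤ p := by
    intro i hi
    rw [List.append_nil] at hi
    have h3 := ((mem_circQ f (p :: rest) s n hs0 hsn i).mp hi).2.2
    rcases List.mem_cons.mp h3 with he | hr
    · omega
    · exact le_of_lt ((List.pairwise_cons.mp hsort).1 _ hr)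
  have hph := phase f p loc (circQ f (p :: rest) s n) [] fuel (ans + 1) (by simp) hle hm
    (by simpa using hfuel)
  rw [if_pos hg] at hph
  simp only [List.append_nil] at hph
  have hblock : (groups.getD p []).filter (fun i => decide (s ≤ i))
      ++ (groups.getD p []).filter (fun i => decide (i < s))
      = (circQ f (p :: rest) s n).filter (fun i => decide (f i = p)) := by
    rw [hgroups p, List.filter_filter, List.filter_filter]
    rw [filter_ge_and _ 0 s n hs0 hsn, filter_lt_and _ 0 s n hs0 hsn]
    unfold circQ
    rw [List.filter_append]
    rw [filter_filter_of_imp _ _ _ (fun a _ hp => by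
      simp only [decide_eq_true_eq] at hp ⊢; rw [hp]; exact List.mem_cons_self)]
    rw [filter_filter_of_imp _ _ _ (fun a _ hp => by
      simp only [decide_eq_true_eq] at hp ⊢; rw [hp]; exact List.mem_cons_self)]
  simp only [altLoop]
  rw [if_pos hfl.symm, hblock]
  rw [index?_of_mem _ loc hg]
  rw [hph]
  simp only [Option.getD_some]
  ring

-- outer lemma: A's loop from a group boundary equals B's loop over remaining keys
lemma outer (f : Int → Int) (loc : Int) (groups : PySem.Dict Int (List Int)) (n : Int)
    (hgroups : ∀ q, groups.getD q [] = (PySem.List.pyRange 0 n 1).filter (fun i => decide (f i = q))) :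
  ∀ (rest : List Int) (p s ans : Int) (fuel : Nat),
    0 ≤ s → s ≤ n →
    (p :: rest).Pairwise (· > ·) →
    (∀ q ∈ p :: rest, ∃ i, i ∈ PySem.List.pyRange 0 n 1 ∧ f i = q) →
    loc ∈ PySem.List.pyRange 0 n 1 →
    f loc ∈ p :: rest →
    (circQ f (p :: rest) s n).length * (circQ f (p :: rest) s n).length + (circQ f (p :: rest) s n).length ≤ fuel →
    solutionLoop loc fuel (ans + 1) p ((circQ f (p :: rest) s n).map f) (circQ f (p :: rest) s n)
      = altLoop loc (f loc) groups (p :: rest) ans s := by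
  intro rest
  induction rest with
  | nil =>
    intro p s ans fuel hs0 hsn hsort hne hlocr hflks hfuel
    exact found_case f loc groups n hgroups [] p s ans fuel hs0 hsn hsort hlocr
      (by simpa using hflks) hfuel
  | cons p' rest' ih =>
    intro p s ans fuel hs0 hsn hsort hne hlocr hflks hfuel
    by_cases hfl : f loc = p
    · exact found_case f loc groups n hgroups (p' :: rest') p s ans fuel hs0 hsn hsort hlocr
        hfl hfuel
    · -- the location's group comes later: process group p entirely, recurse
      have hflr : f loc ∈ p' :: rest' := by
        rcases List.mem_cons.mp hflks with he | hr
        · exact absurd he hfl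
        · exact hr
      have hlocb := PySem.List.mem_pyRange_one.mp hlocr
      have hpnotin : p ∉ p' :: rest' := by
        intro hmem
        have := (List.pairwise_cons.mp hsort).1 p hmem
        omega
      obtain ⟨ip, hipr, hipf⟩ := hne p List.mem_cons_self
      have hipb := PySem.List.mem_pyRange_one.mp hipr
      have hipQ : ip ∈ circQ f (p :: p' :: rest') s n :=
        (mem_circQ f (p :: p' :: rest') s n hs0 hsn ip).mpr
          ⟨hipb.1, hipb.2, by rw [hipf]; exact List.mem_cons_self⟩
      have hm : p ∈ (circQ f (p :: p' :: rest') s n).map f := List.mem_map.mpr ⟨ip, hipQ, hipf⟩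
      have hle : ∀ i ∈ circQ f (p :: p' :: rest') s n ++ [], f i ≤ p := by
        intro i hi
        rw [List.append_nil] at hi
        have h3 := ((mem_circQ f (p :: p' :: rest') s n hs0 hsn i).mp hi).2.2
        rcases List.mem_cons.mp h3 with he | hr
        · omega
        · exact le_of_lt ((List.pairwise_cons.mp hsort).1 _ hr)
      have hloc_notin : loc ∉ (circQ f (p :: p' :: rest') s n).filter (fun i => decide (f i = p)) := by
        intro hmem
        exact hfl (by simpa using (List.mem_filter.mp hmem).2)
      have hph := phase f p loc (circQ f (p :: p' :: rest') s n) [] fuel (ans + 1) (by simp) hle hm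
        (by simpa using hfuel)
      rw [if_neg hloc_notin] at hph
      simp only [List.append_nil] at hph
      obtain ⟨fuel', hb, he⟩ := hph
      -- the two halves of B's block
      have hbh : (groups.getD p []).filter (fun i => decide (s ≤ i))
          = (PySem.List.pyRange s n 1).filter (fun i => decide (f i = p)) := by
        rw [hgroups p, List.filter_filter, filter_ge_and _ 0 s n hs0 hsn]
      have hbl : (groups.getD p []).filter (fun i => decide (i < s))
          = (PySem.List.pyRange 0 s 1).filter (fun i => decide (f i = p)) := by
        rw [hgroups p, List.filter_filter, filter_lt_and _ 0 s n hs0 hsn]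
      have hgblock : (circQ f (p :: p' :: rest') s n).filter (fun i => decide (f i = p))
          = (PySem.List.pyRange s n 1).filter (fun i => decide (f i = p))
            ++ (PySem.List.pyRange 0 s 1).filter (fun i => decide (f i = p)) := by
        unfold circQ
        rw [List.filter_append]
        rw [filter_filter_of_imp _ _ _ (fun a _ hp => by
          simp only [decide_eq_true_eq] at hp ⊢; rw [hp]; exact List.mem_cons_self)]
        rw [filter_filter_of_imp _ _ _ (fun a _ hp => by
          simp only [decide_eq_true_eq] at hp ⊢; rw [hp]; exact List.mem_cons_self)]
      have hipblock : ip ∈ (PySem.List.pyRange s n 1).filter (fun i => decide (f i = p))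
            ++ (PySem.List.pyRange 0 s 1).filter (fun i => decide (f i = p)) := by
        rw [← hgblock]
        exact List.mem_filter.mpr ⟨hipQ, by simp [hipf]⟩
      by_cases hcase : (PySem.List.pyRange 0 s 1).filter (fun i => decide (f i = p)) = []
      · -- case B: the whole group lies at or after the pointer
        rw [hcase, List.append_nil] at hipblock hgblock
        have hbne : (PySem.List.pyRange s n 1).filter (fun i => decide (f i = p)) ≠ [] :=
          List.ne_nil_of_mem hipblock
        have ht0 := List.getLast_mem hbne
        obtain ⟨htR, htf'⟩ := List.mem_filter.mp ht0
        have htf : f (((PySem.List.pyRange s n 1).filter (fun i => decide (f i = p))).getLast hbne) = p := by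
          simpa using htf'
        set t := ((PySem.List.pyRange s n 1).filter (fun i => decide (f i = p))).getLast hbne with htdef
        have htb := PySem.List.mem_pyRange_one.mp htR
        have hmaxBH : ∀ i ∈ (PySem.List.pyRange s n 1).filter (fun i => decide (f i = p)), i ≤ t :=
          fun i hi => le_getLast_of_pairwise_lt _
            ((PySem.List.pairwise_lt_pyRange_one s n).sublist List.filter_sublist) i hi hbne
        have hLfree : ∀ i ∈ PySem.List.pyRange 0 s 1, f i ≠ p := by
          intro i hi hfi
          have : i ∈ (PySem.List.pyRange 0 s 1).filter (fun i => decide (f i = p)) :=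
            List.mem_filter.mpr ⟨hi, by simp [hfi]⟩
          rw [hcase] at this
          simp at this
        have hVfree1 : ∀ i ∈ PySem.List.pyRange (t+1) n 1, f i ≠ p := by
          intro i hi hfi
          have hiR := PySem.List.mem_pyRange_one.mp hi
          have : i ∈ (PySem.List.pyRange s n 1).filter (fun i => decide (f i = p)) :=
            List.mem_filter.mpr ⟨PySem.List.mem_pyRange_one.mpr ⟨by omega, hiR.2⟩, by simp [hfi]⟩
          have := hmaxBH i this
          omega
        have hsplitH : PySem.List.pyRange s n 1
            = PySem.List.pyRange s t 1 ++ t :: PySem.List.pyRange (t+1) n 1 := by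
          rw [PySem.List.pyRange_one_append s t n htb.1 (le_of_lt htb.2),
              PySem.List.pyRange_one_cons htb.2]
        have hdec : circQ f (p :: p' :: rest') s n
            = (PySem.List.pyRange s t 1).filter (fun i => decide (f i ∈ p :: p' :: rest'))
              ++ t :: ((PySem.List.pyRange (t+1) n 1).filter (fun i => decide (f i ∈ p :: p' :: rest'))
                ++ (PySem.List.pyRange 0 s 1).filter (fun i => decide (f i ∈ p :: p' :: rest'))) := by
          unfold circQ
          rw [hsplitH, List.filter_append, List.filter_cons]
          have : (decide (f t ∈ p :: p' :: rest')) = true := by simp [htf]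
          rw [this]
          simp [List.append_assoc]
        have hVfree' : ∀ i ∈ (PySem.List.pyRange (t+1) n 1).filter (fun i => decide (f i ∈ p :: p' :: rest'))
            ++ (PySem.List.pyRange 0 s 1).filter (fun i => decide (f i ∈ p :: p' :: rest')), f i ≠ p := by
          intro i hi
          rcases List.mem_append.mp hi with h | h
          · exact hVfree1 i (List.mem_filter.mp h).1
          · exact hLfree i (List.mem_filter.mp h).1
        have hAL : afterLastM f p (circQ f (p :: p' :: rest') s n)
            = (PySem.List.pyRange (t+1) n 1).filter (fun i => decide (f i ∈ p :: p' :: rest'))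
              ++ (PySem.List.pyRange 0 s 1).filter (fun i => decide (f i ∈ p :: p' :: rest')) := by
          rw [hdec]
          exact afterLastM_spec f p _ t _ htf hVfree'
        have hNB : nonMBefore f p (circQ f (p :: p' :: rest') s n)
            = ((PySem.List.pyRange s t 1).filter (fun i => decide (f i ∈ p :: p' :: rest'))).filter
                (fun i => decide (f i ≠ p)) := by
          rw [hdec]
          exact nonMBefore_spec f p _ t _ htf hVfree'
        have hq' : afterLastM f p (circQ f (p :: p' :: rest') s n)
              ++ nonMBefore f p (circQ f (p :: p' :: rest') s n)
            = circQ f (p' :: rest') (t+1) n := by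
          rw [hAL, hNB]
          rw [kfilter_ne_eq_restfilter f p (p' :: rest') _ hpnotin,
              kfilter_to_restfilter f p (p' :: rest') _ hVfree1,
              kfilter_to_restfilter f p (p' :: rest') _ hLfree]
          unfold circQ
          rw [show PySem.List.pyRange 0 (t+1) 1
              = PySem.List.pyRange 0 s 1 ++ (PySem.List.pyRange s t 1 ++ [t]) by
            rw [← PySem.List.pyRange_one_singleton t,
                ← PySem.List.pyRange_one_append s t (t+1) htb.1 (by omega),
                ← PySem.List.pyRange_one_append 0 s (t+1) hs0 (by omega)]]
          rw [List.filter_append, List.filter_append]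
          have hftn : f t ∉ p' :: rest' := by rw [htf]; exact hpnotin
          simp only [List.mem_cons, not_or] at hftn
          rw [show ([t].filter (fun i => decide (f i ∈ p' :: rest'))) = [] by
            simp [hftn.1, hftn.2]]
          simp [List.append_assoc]
        have hgetd : PySem.List.pyGetD ((PySem.List.pyRange s n 1).filter (fun i => decide (f i = p))) (-1) 0 = t := by
          rw [PySem.List.pyGetD_neg_one _ _ hbne]
        have hsort' : (p' :: rest').Pairwise (· > ·) := (List.pairwise_cons.mp hsort).2
        have hp'max : (PySem.List.max? ((circQ f (p' :: rest') (t+1) n).map f) (fun x => x)).getD 0 = p' := by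
          obtain ⟨i', hi'r, hi'f⟩ := hne p' (List.mem_cons_of_mem _ List.mem_cons_self)
          have hib := PySem.List.mem_pyRange_one.mp hi'r
          have hiQ : i' ∈ circQ f (p' :: rest') (t+1) n :=
            (mem_circQ f (p' :: rest') (t+1) n (by omega) (by omega) i').mpr
              ⟨hib.1, hib.2, by rw [hi'f]; exact List.mem_cons_self⟩
          apply maxD_of
          · exact List.mem_map.mpr ⟨i', hiQ, hi'f⟩
          · intro y hy
            obtain ⟨j, hj, hjf⟩ := List.mem_map.mp hy
            have h3 := ((mem_circQ f (p' :: rest') (t+1) n (by omega) (by omega) j).mp hj).2.2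
            rcases List.mem_cons.mp h3 with heq | hr
            · rw [← hjf, heq]
            · have := (List.pairwise_cons.mp hsort').1 _ hr
              rw [← hjf]; omega
        rw [hq'] at hb he
        rw [hp'max, hgblock] at he
        rw [show ans + 1 + (((PySem.List.pyRange s n 1).filter (fun i => decide (f i = p))).length : Int)
            = (ans + (((PySem.List.pyRange s n 1).filter (fun i => decide (f i = p))).length : Int)) + 1
          from by ring] at he
        rw [he, altLoop_cons]
        rw [if_neg (fun hh => hfl hh.symm)]
        rw [hbh, hbl, hcase, List.append_nil, hgetd]
        exact ih p' (t+1)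
          (ans + (((PySem.List.pyRange s n 1).filter (fun i => decide (f i = p))).length : Int)) fuel'
          (by omega) (by omega) hsort'
          (fun q hq => hne q (List.mem_cons_of_mem _ hq)) hlocr hflr hb
      · -- case A: the group has elements before the pointer; the last of those is block[-1]
        have ht0 := List.getLast_mem hcase
        obtain ⟨htR, htf'⟩ := List.mem_filter.mp ht0
        have htf : f (((PySem.List.pyRange 0 s 1).filter (fun i => decide (f i = p))).getLast hcase) = p := by
          simpa using htf'
        set t := ((PySem.List.pyRange 0 s 1).filter (fun i => decide (f i = p))).getLast hcase with htdef
        have htb := PySem.List.mem_pyRange_one.mp htR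
        have hmaxBL : ∀ i ∈ (PySem.List.pyRange 0 s 1).filter (fun i => decide (f i = p)), i ≤ t :=
          fun i hi => le_getLast_of_pairwise_lt _
            ((PySem.List.pairwise_lt_pyRange_one 0 s).sublist List.filter_sublist) i hi hcase
        -- decompose the queue around t
        have hsplitL : PySem.List.pyRange 0 s 1
            = PySem.List.pyRange 0 t 1 ++ t :: PySem.List.pyRange (t+1) s 1 := by
          rw [PySem.List.pyRange_one_append 0 t s htb.1 (le_of_lt htb.2),
              PySem.List.pyRange_one_cons htb.2]
        have hVfree : ∀ i ∈ PySem.List.pyRange (t+1) s 1, f i ≠ p := by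
          intro i hi hfi
          have hiR := PySem.List.mem_pyRange_one.mp hi
          have : i ∈ (PySem.List.pyRange 0 s 1).filter (fun i => decide (f i = p)) :=
            List.mem_filter.mpr ⟨PySem.List.mem_pyRange_one.mpr ⟨by omega, hiR.2⟩, by simp [hfi]⟩
          have := hmaxBL i this
          omega
        have hVfree' : ∀ i ∈ (PySem.List.pyRange (t+1) s 1).filter
            (fun i => decide (f i ∈ p :: p' :: rest')), f i ≠ p :=
          fun i hi => hVfree i (List.mem_filter.mp hi).1
        have hdec : circQ f (p :: p' :: rest') s n
            = ((PySem.List.pyRange s n 1).filter (fun i => decide (f i ∈ p :: p' :: rest'))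
                ++ (PySem.List.pyRange 0 t 1).filter (fun i => decide (f i ∈ p :: p' :: rest')))
              ++ t :: (PySem.List.pyRange (t+1) s 1).filter (fun i => decide (f i ∈ p :: p' :: rest')) := by
          unfold circQ
          rw [hsplitL, List.filter_append, List.filter_cons]
          have : (decide (f t ∈ p :: p' :: rest')) = true := by
            simp [htf]
          rw [this]
          simp [List.append_assoc]
        have hAL : afterLastM f p (circQ f (p :: p' :: rest') s n)
            = (PySem.List.pyRange (t+1) s 1).filter (fun i => decide (f i ∈ p :: p' :: rest')) := by
          rw [hdec]
          exact afterLastM_spec f p _ t _ htf hVfree'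
        have hNB : nonMBefore f p (circQ f (p :: p' :: rest') s n)
            = ((PySem.List.pyRange s n 1).filter (fun i => decide (f i ∈ p :: p' :: rest'))
                ++ (PySem.List.pyRange 0 t 1).filter (fun i => decide (f i ∈ p :: p' :: rest'))).filter
                (fun i => decide (f i ≠ p)) := by
          rw [hdec]
          exact nonMBefore_spec f p _ t _ htf hVfree'
        -- the remaining queue is the circular queue of the remaining groups from pointer t+1
        have hq' : afterLastM f p (circQ f (p :: p' :: rest') s n)
              ++ nonMBefore f p (circQ f (p :: p' :: rest') s n)
            = circQ f (p' :: rest') (t+1) n := by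
          rw [hAL, hNB, List.filter_append]
          rw [kfilter_ne_eq_restfilter f p (p' :: rest') _ hpnotin,
              kfilter_ne_eq_restfilter f p (p' :: rest') _ hpnotin,
              kfilter_to_restfilter f p (p' :: rest') _ hVfree]
          unfold circQ
          rw [PySem.List.pyRange_one_append (t+1) s n (by omega) hsn, List.filter_append]
          rw [show PySem.List.pyRange 0 (t+1) 1 = PySem.List.pyRange 0 t 1 ++ [t] by
            rw [PySem.List.pyRange_one_append 0 t (t+1) htb.1 (by omega),
                PySem.List.pyRange_one_singleton]]
          rw [List.filter_append]
          have hftn : f t ∉ p' :: rest' := by rw [htf]; exact hpnotin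
          simp only [List.mem_cons, not_or] at hftn
          rw [show ([t].filter (fun i => decide (f i ∈ p' :: rest'))) = [] by
            simp [hftn.1, hftn.2]]
          simp [List.append_assoc]
        -- wire everything together and recurse
        have hbne : (PySem.List.pyRange s n 1).filter (fun i => decide (f i = p))
            ++ (PySem.List.pyRange 0 s 1).filter (fun i => decide (f i = p)) ≠ [] :=
          List.ne_nil_of_mem hipblock
        have hlastt : ((PySem.List.pyRange s n 1).filter (fun i => decide (f i = p))
            ++ (PySem.List.pyRange 0 s 1).filter (fun i => decide (f i = p))).getLast hbne = t := by
          rw [List.getLast_append]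
          rw [dif_neg (by simpa using hcase)]
        have hgetd : PySem.List.pyGetD ((PySem.List.pyRange s n 1).filter (fun i => decide (f i = p))
            ++ (PySem.List.pyRange 0 s 1).filter (fun i => decide (f i = p))) (-1) 0 = t := by
          rw [PySem.List.pyGetD_neg_one _ _ hbne, hlastt]
        have hsort' : (p' :: rest').Pairwise (· > ·) := (List.pairwise_cons.mp hsort).2
        have hp'max : (PySem.List.max? ((circQ f (p' :: rest') (t+1) n).map f) (fun x => x)).getD 0 = p' := by
          obtain ⟨i', hi'r, hi'f⟩ := hne p' (List.mem_cons_of_mem _ List.mem_cons_self)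
          have hib := PySem.List.mem_pyRange_one.mp hi'r
          have hiQ : i' ∈ circQ f (p' :: rest') (t+1) n :=
            (mem_circQ f (p' :: rest') (t+1) n (by omega) (by omega) i').mpr
              ⟨hib.1, hib.2, by rw [hi'f]; exact List.mem_cons_self⟩
          apply maxD_of
          · exact List.mem_map.mpr ⟨i', hiQ, hi'f⟩
          · intro y hy
            obtain ⟨j, hj, hjf⟩ := List.mem_map.mp hy
            have h3 := ((mem_circQ f (p' :: rest') (t+1) n (by omega) (by omega) j).mp hj).2.2
            rcases List.mem_cons.mp h3 with heq | hr
            · rw [← hjf, heq]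
            · have := (List.pairwise_cons.mp hsort').1 _ hr
              rw [← hjf]; omega
        rw [hq'] at hb he
        rw [hp'max, hgblock] at he
        rw [show ans + 1 + (((PySem.List.pyRange s n 1).filter (fun i => decide (f i = p))
              ++ (PySem.List.pyRange 0 s 1).filter (fun i => decide (f i = p))).length : Int)
            = (ans + (((PySem.List.pyRange s n 1).filter (fun i => decide (f i = p))
              ++ (PySem.List.pyRange 0 s 1).filter (fun i => decide (f i = p))).length : Int)) + 1
          from by ring] at he
        rw [he, altLoop_cons]
        rw [if_neg (fun hh => hfl hh.symm)]
        rw [hbh, hbl, hgetd]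
        exact ih p' (t+1) (ans + (((PySem.List.pyRange s n 1).filter (fun i => decide (f i = p))
            ++ (PySem.List.pyRange 0 s 1).filter (fun i => decide (f i = p))).length : Int)) fuel'
          (by omega) (by omega) hsort'
          (fun q hq => hne q (List.mem_cons_of_mem _ hq)) hlocr hflr hb

lemma getD_build (l : List (Int × Int)) (d : PySem.Dict Int (List Int)) (c : Int) :
    (l.foldl (fun d q => d.modify q.2 ([] : List Int) (fun v => v ++ [q.1])) d).getD c []
      = d.getD c [] ++ (l.filter (fun q => q.2 == c)).map (·.1) := by
  induction l generalizing d with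
  | nil => simp
  | cons x l ih =>
    simp only [List.foldl_cons, List.filter_cons]
    rw [ih]
    by_cases hx : x.2 = c
    · rw [PySem.Dict.getD_modify]
      simp [hx]
    · rw [PySem.Dict.getD_modify]
      have : ¬ c = x.2 := fun h => hx h.symm
      simp [hx, this]

-- ===== VERDICT (by name: the statement is the Claim_ definition above) =====
theorem solution_spec : Claim_equal_solution := by
  unfold Claim_equal_solution Spec_solution Pre_solution
  intro priorities location _hdom hpre
  obtain ⟨hnil, hl0, hln⟩ := hpre
  set f : Int → Int := fun i => PySem.List.pyGetD priorities i 0 with hf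
  set N : Nat := priorities.length with hN
  set G : PySem.Dict Int (List Int) := (PySem.List.enumerate priorities 0).foldl
    (fun d q => d.modify q.2 ([] : List Int) (fun l => l ++ [q.1])) PySem.Dict.empty with hG
  set ks : List Int := PySem.List.sorted G.keys (fun x => x) true with hks
  have hgroups : ∀ q, G.getD q [] = (PySem.List.pyRange 0 (N : Int) 1).filter
      (fun i => decide (f i = q)) := by
    intro q
    rw [hG, getD_build]
    rw [PySem.Dict.getD_empty, List.nil_append]
    rw [PySem.List.enumerate_eq_map_pyRange priorities 0]
    rw [List.filter_map, List.map_map]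
    simp only [Function.comp_def, List.map_id']
    apply List.filter_congr
    intro a _
    by_cases h : PySem.List.pyGetD priorities a 0 = q <;> simp [hf, h]
  have hkeys : G.keys = PySem.Set.ofList priorities := by
    rw [hG, PySem.Dict.keys_foldl_modify_key _ (fun q : Int × Int => q.2) _ _ _]
    rw [PySem.Dict.keys_empty, PySem.List.map_snd_enumerate]
    rfl
  have hksmem : ∀ q, q ∈ ks ↔ q ∈ priorities := by
    intro q
    rw [hks, PySem.List.mem_sorted, hkeys, PySem.Set.mem_ofList]
  have hksnodup : ks.Nodup := by
    rw [hks]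
    refine (PySem.List.sorted_perm _ _ _).nodup_iff.mpr ?_
    rw [hkeys]
    exact PySem.Set.nodup_ofList priorities
  have hsortgt : ks.Pairwise (· > ·) := by
    have h1 : ks.Pairwise (fun a b => b ≤ a) := PySem.List.sorted_pairwise_rev _ _
    exact (h1.and hksnodup).imp (fun h => lt_of_le_of_ne h.1 h.2.symm)
  have hksne : ks ≠ [] := by
    rw [hks, Ne, PySem.List.sorted_eq_nil_iff, hkeys]
    intro hempty
    obtain ⟨a, as, rfl⟩ := List.exists_cons_of_ne_nil hnil
    have : a ∈ PySem.Set.ofList (a :: as) := (PySem.Set.mem_ofList _ _).mpr List.mem_cons_self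
    rw [hempty] at this
    simp at this
  obtain ⟨kh, kt, hksc⟩ := List.exists_cons_of_ne_nil hksne
  have hkhmax : ∀ y ∈ priorities, y ≤ kh := by
    intro y hy
    have := (hksmem y).mpr hy
    rw [hksc] at this
    rcases List.mem_cons.mp this with he | hr
    · omega
    · have := (List.pairwise_cons.mp (hksc ▸ hsortgt)).1 _ hr
      omega
  have hmaxp : (PySem.List.max? priorities (fun x => x)).getD 0 = kh :=
    maxD_of priorities kh ((hksmem kh).mp (hksc ▸ List.mem_cons_self)) hkhmax
  have hgne : ∀ q ∈ kh :: kt, ∃ i ∈ PySem.List.pyRange 0 (N : Int) 1, f i = q := by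
    intro q hq
    have hqp : q ∈ priorities := (hksmem q).mp (hksc ▸ hq)
    obtain ⟨k, hk, hkq⟩ := List.getElem_of_mem hqp
    refine ⟨(k : Int), PySem.List.mem_pyRange_one.mpr ⟨by omega, by rw [hN]; exact_mod_cast hk⟩, ?_⟩
    rw [hf]
    simp only [PySem.List.pyGetD_natCast]
    rw [List.getD_eq_getElem _ _ hk, hkq]
  have hlocr : location ∈ PySem.List.pyRange 0 (N : Int) 1 :=
    PySem.List.mem_pyRange_one.mpr ⟨hl0, hln⟩
  have hinr : PySem.Raise.InRange priorities.length location := by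
    unfold PySem.Raise.InRange
    omega
  have hflks : f location ∈ kh :: kt := by
    rw [← hksc]
    exact (hksmem _).mpr (PySem.List.pyGetD_mem priorities 0 hinr)
  have hQ : circQ f (kh :: kt) 0 (N : Int) = PySem.List.pyRange 0 (N : Int) 1 := by
    unfold circQ
    rw [PySem.List.pyRange_one_eq_nil (le_refl 0), List.filter_nil, List.append_nil]
    apply List.filter_eq_self.mpr
    intro a ha
    have hb := PySem.List.mem_pyRange_one.mp ha
    have hmem : f a ∈ priorities := PySem.List.pyGetD_mem priorities 0 (by unfold PySem.Raise.InRange; omega)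
    have := (hksmem (f a)).mpr hmem
    rw [hksc] at this
    simpa using this
  have hmapQ : (PySem.List.pyRange 0 (N : Int) 1).map f = priorities := by
    rw [hf, hN]
    exact PySem.List.map_pyGetD_pyRange_zero' priorities 0
  have hfuel : (circQ f (kh :: kt) 0 (N : Int)).length * (circQ f (kh :: kt) 0 (N : Int)).length
      + (circQ f (kh :: kt) 0 (N : Int)).length ≤ N * N + N + 1 := by
    rw [hQ, PySem.List.length_pyRange_one]
    simp
  have hmain := outer f location G (N : Int) hgroups kt kh 0 0 (N * N + N + 1)
    (le_refl 0) (by positivity) (hksc ▸ hsortgt) hgne hlocr hflks hfuel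
  rw [hQ, hmapQ] at hmain
  show solutionLoop location (N * N + N + 1) 1 ((PySem.List.max? priorities (fun x => x)).getD 0)
      priorities (PySem.List.pyRange 0 (N : Int) 1)
    = altLoop location (PySem.List.pyGetD priorities location 0) G ks 0 0
  rw [hmaxp, hksc]
  exact hmain
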